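-- pv_equiv track=rewrite | github.com/rthallapally/AI_Research_Agent | app.py | build_subgraph
-- ===== SOURCE A (Python) =====
-- from collections import deque, defaultdict
-- from collections import defaultdict, deque
--
-- def build_subgraph(adj: dict, center_id: str, hops: int = 1) -> dict:
--     """Return an adjacency subgraph containing nodes within N hops of center_id."""
--     if not center_id:
--         return adj or {"nodes": [], "edges": []}
--
--     nodes = adj.get("nodes", [])
--     edges = adj.get("edges", [])
--
--     # Build neighbor map (undirected)
--     nbrs = defaultdict(set)
--     for e in edges:
--         src = e.get("source")
--         tgt = e.get("target")
--         if not src or not tgt: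
--             continue
--         src, tgt = str(src), str(tgt)
--         nbrs[src].add(tgt)
--         nbrs[tgt].add(src)
--
--     # BFS up to N hops
--     seen = {str(center_id)}
--     q = deque([(str(center_id), 0)])
--     while q:
--         node, d = q.popleft()
--         if d >= hops:
--             continue
--         for v in nbrs.get(node, ()):
--             if v not in seen:
--                 seen.add(v)
--                 q.append((v, d + 1))
--
--     # Filter nodes/edges to the seen set
--     sub_nodes = [n for n in nodes if str(n.get("id")) in seen]
--     seen_ids = {n.get("id") for n in sub_nodes}
--     sub_edges = [
--         e for e in edges
--         if str(e.get("source")) in seen_ids and str(e.get("target")) in seen_ids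
--     ]
--
--     return {"nodes": sub_nodes, "edges": sub_edges}
-- ===== SOURCE B (Python) =====
-- def build_subgraph(adj: dict, center_id: str, hops: int = 1) -> dict:
--     """Return an adjacency subgraph containing nodes within N hops of center_id."""
--     if not center_id:
--         return adj or {"nodes": [], "edges": []}
--
--     nodes = adj.get("nodes", [])
--     edges = adj.get("edges", [])
--
--     # Collect the undirected endpoint pairs once (no neighbor map, no queue).
--     pairs = []
--     for e in edges:
--         s, t = e.get("source"), e.get("target")
--         if s and t:
--             pairs.append((str(s), str(t)))
--
--     # Iterated edge relaxation: one whole-graph sweep per hop, stop at a fixpoint.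
--     seen = {str(center_id)}
--     for _ in range(hops):
--         grown = {t for (s, t) in pairs if s in seen} | {s for (s, t) in pairs if t in seen}
--         if grown <= seen:
--             break
--         seen |= grown
--
--     sub_nodes = [n for n in nodes if str(n.get("id")) in seen]
--     seen_ids = {n.get("id") for n in sub_nodes}
--     sub_edges = [
--         e for e in edges
--         if str(e.get("source")) in seen_ids and str(e.get("target")) in seen_ids
--     ]
--
--     return {"nodes": sub_nodes, "edges": sub_edges}
-- ===== Notes on version B (the rewrite author's own statement) =====
-- stated objective: alternative
-- what changed: Replaces the neighbor-map construction plus distance-tagged deque BFS with iterated edge relaxation: no adjacency dict and no queue are built; instead the seen set is grown by whole edge-list sweeps, one per hop, stopping at a fixpoint.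
import Mathlib
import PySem

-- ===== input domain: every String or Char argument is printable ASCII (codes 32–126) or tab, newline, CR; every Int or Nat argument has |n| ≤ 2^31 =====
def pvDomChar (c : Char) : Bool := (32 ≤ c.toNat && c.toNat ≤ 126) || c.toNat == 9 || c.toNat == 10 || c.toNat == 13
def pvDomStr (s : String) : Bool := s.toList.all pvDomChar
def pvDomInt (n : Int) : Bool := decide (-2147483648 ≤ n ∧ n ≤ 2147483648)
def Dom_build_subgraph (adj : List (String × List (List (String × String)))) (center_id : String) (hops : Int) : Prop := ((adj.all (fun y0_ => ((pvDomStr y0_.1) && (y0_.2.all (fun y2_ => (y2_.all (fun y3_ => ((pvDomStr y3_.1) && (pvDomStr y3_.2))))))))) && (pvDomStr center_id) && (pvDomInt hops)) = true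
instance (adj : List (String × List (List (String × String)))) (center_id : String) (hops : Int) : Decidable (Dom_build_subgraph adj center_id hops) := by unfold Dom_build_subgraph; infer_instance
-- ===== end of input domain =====

-- B replaces the neighbor-map + distance-tagged deque BFS of A by iterated whole-edge-list
-- relaxation sweeps (one per hop, stopping at a fixpoint); objective: alternative algorithm.

-- ===== PORT A =====

-- str(x) applied to the result of dict.get: str(None) = "None", str of a str is itself
def pystr (o : Option String) : String :=
  match o with
  | none => "None"
  | some s => s

-- Python truthiness of an Optional[str]: falsy iff None or ""
def pvFalsy (o : Option String) : Bool :=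
  match o with
  | none => true
  | some s => s == ""

-- the neighbor-map loop of A (defaultdict(set); nbrs[src].add(tgt); nbrs[tgt].add(src))
def nbrStep (nbrs : PySem.Dict String (PySem.Set String)) (e : List (String × String)) :
    PySem.Dict String (PySem.Set String) :=
  let src := (PySem.Dict.mk e).get? "source"
  let tgt := (PySem.Dict.mk e).get? "target"
  if pvFalsy src || pvFalsy tgt then nbrs
  else
    let s := pystr src
    let t := pystr tgt
    let nbrs1 := nbrs.insert s ((nbrs.getD s PySem.Set.empty).add t)
    nbrs1.insert t ((nbrs1.getD t PySem.Set.empty).add s)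

def buildNbrs (edges : List (List (String × String))) : PySem.Dict String (PySem.Set String) :=
  edges.foldl nbrStep PySem.Dict.empty

-- the body of A's inner 'for v in nbrs.get(node, ()):' loop
def bfsPush (d : Int) (acc : PySem.Set String × List (String × Int)) (v : String) :
    PySem.Set String × List (String × Int) :=
  if acc.1.contains v then acc else (acc.1.add v, acc.2 ++ [(v, d + 1)])

-- all strings occurring in the neighbor sets (for the termination measure only)
def nbrVals (nbrs : PySem.Dict String (PySem.Set String)) : List String :=
  nbrs.items.flatMap (·.2)

def bfsMeasure (nbrs : PySem.Dict String (PySem.Set String))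
    (seen : PySem.Set String) (q : List (String × Int)) : Nat :=
  2 * ((nbrVals nbrs).filter (fun x => !(decide (x ∈ seen)))).length + q.length

theorem pvMemAddIff (seen : PySem.Set String) (v x : String) :
    x ∈ seen.add v ↔ x ∈ seen ∨ x = v := PySem.Set.mem_add seen v x

theorem pvFilterNotContainsAdd (l : List String) (seen : PySem.Set String) (v : String)
    (hv : v ∈ l) (hns : v ∉ seen) :
    (l.filter (fun x => !(decide (x ∈ seen.add v)))).length + 1
      ≤ (l.filter (fun x => !(decide (x ∈ seen)))).length := by
  induction l with
  | nil => cases hv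
  | cons a t ih =>
    by_cases hav : a = v
    · subst hav
      have h1 : a ∈ seen.add a := (pvMemAddIff seen a a).mpr (Or.inr rfl)
      simp only [List.filter_cons]
      simp only [h1, hns, decide_true, decide_false, Bool.not_true, Bool.not_false,
        Bool.false_eq_true, if_true, if_false, List.length_cons]
      have hmono : (t.filter (fun x => !(decide (x ∈ seen.add a)))).length
          ≤ (t.filter (fun x => !(decide (x ∈ seen)))).length := by
        simp only [← List.countP_eq_length_filter]
        apply List.countP_mono_left
        intro x _ hx
        simp only [Bool.not_eq_eq_eq_not, Bool.not_true, decide_eq_false_iff_not] at hx ⊢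
        exact fun hmem => hx ((pvMemAddIff seen a x).mpr (Or.inl hmem))
      omega
    · have hvt : v ∈ t := by
        rcases List.mem_cons.mp hv with h | h
        · exact absurd h.symm hav
        · exact h
      have heq : (a ∈ seen.add v) ↔ (a ∈ seen) := by
        rw [pvMemAddIff]
        constructor
        · rintro (h | h)
          · exact h
          · exact absurd h hav
        · exact Or.inl
      simp only [List.filter_cons]
      by_cases hb : a ∈ seen
      · simp only [hb, heq.mpr hb, decide_true, Bool.not_true, Bool.false_eq_true, if_false]
        exact ih hvt
      · have hb' : a ∉ seen.add v := fun h => hb (heq.mp h)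
        simp only [hb, hb', decide_false, Bool.not_false, if_true, List.length_cons]
        have := ih hvt; omega

theorem bfsPush_measure (nbrs : PySem.Dict String (PySem.Set String)) (d : Int)
    (L : List String) (hL : ∀ v ∈ L, v ∈ nbrVals nbrs) :
    ∀ seen q, bfsMeasure nbrs (L.foldl (bfsPush d) (seen, q)).1 (L.foldl (bfsPush d) (seen, q)).2
      ≤ bfsMeasure nbrs seen q := by
  induction L with
  | nil => intro seen q; simp [List.foldl]
  | cons v L ih =>
    intro seen q
    have hLrest : ∀ x ∈ L, x ∈ nbrVals nbrs := fun x hx => hL x (List.mem_cons_of_mem _ hx)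
    simp only [List.foldl_cons]
    by_cases hv : v ∈ seen
    · have : bfsPush d (seen, q) v = (seen, q) := by
        simp [bfsPush, hv]
      rw [this]; exact ih hLrest seen q
    · have hstep' : bfsPush d (seen, q) v = (seen.add v, q ++ [(v, d + 1)]) := by
        simp [bfsPush, hv]
      rw [hstep']
      have hkey := pvFilterNotContainsAdd (nbrVals nbrs) seen v (hL v (List.mem_cons_self ..)) hv
      refine le_trans (ih hLrest (seen.add v) (q ++ [(v, d + 1)])) ?_
      simp only [bfsMeasure, List.length_append, List.length_cons, List.length_nil]
      omega

theorem mem_getD_nbrVals (nbrs : PySem.Dict String (PySem.Set String)) (node : String) :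
    ∀ v ∈ nbrs.getD node PySem.Set.empty, v ∈ nbrVals nbrs := by
  intro v hv
  rw [PySem.Dict.getD_eq_get?_getD] at hv
  cases hg : nbrs.get? node with
  | none => rw [hg] at hv; cases hv
  | some s =>
    rw [hg] at hv
    simp only [Option.getD_some] at hv
    simp only [nbrVals, List.mem_flatMap]
    exact ⟨(node, s), PySem.Dict.mem_items_of_get?_eq_some nbrs hg, hv⟩

-- A's BFS loop: while q: pop left; skip if d >= hops; else push unseen neighbors at d+1
def bfsA (nbrs : PySem.Dict String (PySem.Set String)) (hops : Int)
    (seen : PySem.Set String) (q : List (String × Int)) : PySem.Set String :=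
  match q with
  | [] => seen
  | (node, d) :: rest =>
    if hops ≤ d then bfsA nbrs hops seen rest
    else
      let st := (nbrs.getD node PySem.Set.empty).foldl (bfsPush d) (seen, rest)
      bfsA nbrs hops st.1 st.2
termination_by bfsMeasure nbrs seen q
decreasing_by
  · simp [bfsMeasure]
  · have h1 := bfsPush_measure nbrs d (nbrs.getD node PySem.Set.empty)
      (mem_getD_nbrVals nbrs node) seen rest
    have h2 : bfsMeasure nbrs seen rest < bfsMeasure nbrs seen ((node, d) :: rest) := by
      simp [bfsMeasure]
    omega

def build_subgraph (adj : List (String × List (List (String × String)))) (center_id : String) (hops : Int) : List (String × List (List (String × String))) :=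
  if center_id == "" then
    (if adj.isEmpty then [("nodes", []), ("edges", [])] else adj)
  else
    let nodes := (PySem.Dict.mk adj).getD "nodes" []
    let edges := (PySem.Dict.mk adj).getD "edges" []
    let nbrs := buildNbrs edges
    let seen := bfsA nbrs hops (PySem.Set.add PySem.Set.empty center_id) [(center_id, 0)]
    let sub_nodes := nodes.filter (fun n => seen.contains (pystr ((PySem.Dict.mk n).get? "id")))
    let seen_ids : PySem.Set (Option String) :=
      PySem.Set.ofList (sub_nodes.map (fun n => (PySem.Dict.mk n).get? "id"))
    -- 'str(e.get("source")) in seen_ids': a str only ever equals a str element, never None,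
    -- so the membership test is 'some (pystr …) ∈ seen_ids' — exact for Python's mixed comparison
    let sub_edges := edges.filter (fun e =>
      seen_ids.contains (some (pystr ((PySem.Dict.mk e).get? "source"))) &&
      seen_ids.contains (some (pystr ((PySem.Dict.mk e).get? "target"))))
    [("nodes", sub_nodes), ("edges", sub_edges)]

-- ===== PORT B =====

-- B: collect the undirected endpoint pairs once
def pairStep (ps : List (String × String)) (e : List (String × String)) : List (String × String) :=
  let s := (PySem.Dict.mk e).get? "source"
  let t := (PySem.Dict.mk e).get? "target"
  if pvFalsy s || pvFalsy t then ps else ps ++ [(pystr s, pystr t)]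

def pairsOf (edges : List (List (String × String))) : List (String × String) :=
  edges.foldl pairStep []

-- one relaxation sweep: {t for (s,t) in pairs if s in seen} | {s for (s,t) in pairs if t in seen}
def grow (pairs : List (String × String)) (seen : PySem.Set String) : PySem.Set String :=
  PySem.Set.union
    (PySem.Set.ofList ((pairs.filter (fun p => seen.contains p.1)).map (·.2)))
    ((pairs.filter (fun p => seen.contains p.2)).map (·.1))

-- 'for _ in range(hops): … if grown <= seen: break; seen |= grown'
def bfsB (pairs : List (String × String)) : Nat → PySem.Set String → PySem.Set String
  | 0, seen => seen
  | f + 1, seen =>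
    let g := grow pairs seen
    if PySem.Set.issubset g seen then seen else bfsB pairs f (PySem.Set.union seen g)

def build_subgraph_alt (adj : List (String × List (List (String × String)))) (center_id : String) (hops : Int) : List (String × List (List (String × String))) :=
  if center_id == "" then
    (if adj.isEmpty then [("nodes", []), ("edges", [])] else adj)
  else
    let nodes := (PySem.Dict.mk adj).getD "nodes" []
    let edges := (PySem.Dict.mk adj).getD "edges" []
    let pairs := pairsOf edges
    let seen := bfsB pairs hops.toNat (PySem.Set.add PySem.Set.empty center_id)
    let sub_nodes := nodes.filter (fun n => seen.contains (pystr ((PySem.Dict.mk n).get? "id")))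
    let seen_ids : PySem.Set (Option String) :=
      PySem.Set.ofList (sub_nodes.map (fun n => (PySem.Dict.mk n).get? "id"))
    let sub_edges := edges.filter (fun e =>
      seen_ids.contains (some (pystr ((PySem.Dict.mk e).get? "source"))) &&
      seen_ids.contains (some (pystr ((PySem.Dict.mk e).get? "target"))))
    [("nodes", sub_nodes), ("edges", sub_edges)]

-- ===== PRECONDITION & SPEC =====
def Spec_build_subgraph (adj : List (String × List (List (String × String)))) (center_id : String) (hops : Int) (out : List (String × List (List (String × String)))) : Prop := out = build_subgraph_alt adj center_id hops
instance (adj : List (String × List (List (String × String)))) (center_id : String) (hops : Int) (out : List (String × List (List (String × String)))) : Decidable (Spec_build_subgraph adj center_id hops out) := by unfold Spec_build_subgraph; infer_instance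

-- ===== CLAIM (what is proved, stated in full; the proofs are below) =====
def Claim_equal_build_subgraph : Prop := ∀ (adj : List (String × List (List (String × String)))) (center_id : String) (hops : Int), Dom_build_subgraph adj center_id hops → Spec_build_subgraph adj center_id hops (build_subgraph adj center_id hops)

-- ===== LEMMAS AND PROOFS =====

-- undirected adjacency generated by B's pair list
def adjP (pairs : List (String × String)) (v w : String) : Prop :=
  ∃ p ∈ pairs, (p.1 = v ∧ p.2 = w) ∨ (p.1 = w ∧ p.2 = v)

-- the set of nodes within k hops of c (the common specification of both searches)
def ballP (pairs : List (String × String)) (c : String) : Nat → String → Prop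
  | 0, x => x = c
  | k + 1, x => ballP pairs c k x ∨ ∃ v, ballP pairs c k v ∧ adjP pairs v x

theorem ballP_le (pairs : List (String × String)) (c : String) {k m : Nat} (h : k ≤ m) :
    ∀ x, ballP pairs c k x → ballP pairs c m x := by
  induction m with
  | zero => intro x hx; have : k = 0 := Nat.le_zero.mp h; simpa [this] using hx
  | succ m ih =>
    intro x hx
    rcases Nat.le_succ_iff.mp h  with h' | h'
    · exact Or.inl (ih h' x hx)
    · simpa [h'] using hx

theorem ballP_fix (pairs : List (String × String)) (c : String) (d : Nat)
    (hfix : ∀ x, ballP pairs c (d + 1) x → ballP pairs c d x) :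
    ∀ k, d ≤ k → ∀ x, (ballP pairs c k x ↔ ballP pairs c d x) := by
  intro k
  induction k with
  | zero => intro hk x; have : d = 0 := Nat.le_zero.mp hk; simp [this]
  | succ k ih =>
    intro hk x
    rcases Nat.le_succ_iff.mp hk with h' | h'
    · constructor
      · intro hx
        rcases hx with hx | ⟨v, hv, hadj⟩
        · exact (ih h' x).mp hx
        · exact hfix x (Or.inr ⟨v, (ih h' v).mp hv, hadj⟩)
      · intro hx; exact Or.inl ((ih h' x).mpr hx)
    · simp [h']

theorem adjP_append_singleton (ps : List (String × String)) (s t v w : String) :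
    adjP (ps ++ [(s, t)]) v w ↔ adjP ps v w ∨ ((s = v ∧ t = w) ∨ (s = w ∧ t = v)) := by
  simp only [adjP, List.mem_append, List.mem_singleton]
  constructor
  · rintro ⟨p, hp | hp, hor⟩
    · exact Or.inl ⟨p, hp, hor⟩
    · subst hp; exact Or.inr hor
  · rintro (⟨p, hp, hor⟩ | hor)
    · exact ⟨p, Or.inl hp, hor⟩
    · exact ⟨(s, t), Or.inr rfl, hor⟩

-- membership after the two inserts A performs for one edge (s, t)
theorem insert2_mem (d : PySem.Dict String (PySem.Set String)) (s t v w : String) :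
    (w ∈ ((d.insert s ((d.getD s PySem.Set.empty).add t)).insert t
        (((d.insert s ((d.getD s PySem.Set.empty).add t)).getD t PySem.Set.empty).add s)).getD
          v PySem.Set.empty
      ↔ w ∈ d.getD v PySem.Set.empty ∨ ((s = v ∧ t = w) ∨ (s = w ∧ t = v))) := by
  by_cases hvt : v = t
  · subst hvt
    by_cases hvs : s = v
    · subst hvs
      simp [PySem.Set.mem_add]
      try tauto
    · simp [PySem.Dict.getD_insert, PySem.Set.mem_add, hvs, Ne.symm hvs]
      try tauto
  · by_cases hvs : v = s
    · subst hvs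
      have hsv : ¬ t = v := fun h => hvt h.symm
      simp [PySem.Dict.getD_insert, PySem.Set.mem_add, hvt, hsv]
      try tauto
    · have h1 : ¬ v = t := hvt
      have h2 : ¬ s = v := fun h => hvs h.symm
      have h3 : ¬ t = v := fun h => hvt h.symm
      simp [PySem.Dict.getD_insert, h1, hvs, h2, h3]
      try tauto

-- simultaneous characterization of A's neighbor map and B's pair list
theorem nbr_pair_spec (es : List (List (String × String))) :
    ∀ (d : PySem.Dict String (PySem.Set String)) (ps : List (String × String)),
    (∀ v w, w ∈ d.getD v PySem.Set.empty ↔ adjP ps v w) →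
    ∀ v w, w ∈ (es.foldl nbrStep d).getD v PySem.Set.empty ↔ adjP (es.foldl pairStep ps) v w := by
  induction es with
  | nil => intro d ps h v w; simpa using h v w
  | cons e es ih =>
    intro d ps h v w
    simp only [List.foldl_cons]
    by_cases hf : (pvFalsy ((PySem.Dict.mk e).get? "source") || pvFalsy ((PySem.Dict.mk e).get? "target")) = true
    · have h1 : nbrStep d e = d := by simp [nbrStep, hf]
      have h2 : pairStep ps e = ps := by simp [pairStep, hf]
      rw [h1, h2]; exact ih d ps h v w
    · have h1 : nbrStep d e =
          (d.insert (pystr ((PySem.Dict.mk e).get? "source"))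
            ((d.getD (pystr ((PySem.Dict.mk e).get? "source")) PySem.Set.empty).add
              (pystr ((PySem.Dict.mk e).get? "target")))).insert
            (pystr ((PySem.Dict.mk e).get? "target"))
            (((d.insert (pystr ((PySem.Dict.mk e).get? "source"))
              ((d.getD (pystr ((PySem.Dict.mk e).get? "source")) PySem.Set.empty).add
                (pystr ((PySem.Dict.mk e).get? "target")))).getD
              (pystr ((PySem.Dict.mk e).get? "target")) PySem.Set.empty).add
              (pystr ((PySem.Dict.mk e).get? "source"))) := by
        simp [nbrStep, hf]
      have h2 : pairStep ps e = ps ++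
          [(pystr ((PySem.Dict.mk e).get? "source"), pystr ((PySem.Dict.mk e).get? "target"))] := by
        simp [pairStep, hf]
      rw [h1, h2]
      apply ih
      intro v w
      rw [adjP_append_singleton, ← h v w]
      exact insert2_mem d _ _ v w

-- the inner neighbor-push fold of A, characterized
theorem foldPush_spec (d : Int) (L : List String) :
    ∀ (seen : PySem.Set String) (q : List (String × Int)),
    ∃ new : List String,
      (L.foldl (bfsPush d) (seen, q)).2 = q ++ new.map (fun v => (v, d + 1)) ∧
      (∀ x, x ∈ (L.foldl (bfsPush d) (seen, q)).1 ↔ x ∈ seen ∨ x ∈ new) ∧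
      (∀ x ∈ new, x ∈ L ∧ x ∉ seen) ∧
      (∀ x ∈ L, x ∈ (L.foldl (bfsPush d) (seen, q)).1) := by
  induction L with
  | nil => intro seen q; exact ⟨[], by simp, by simp, by simp, by simp⟩
  | cons v L ih =>
    intro seen q
    simp only [List.foldl_cons]
    by_cases hv : v ∈ seen
    · have hred : bfsPush d (seen, q) v = (seen, q) := by
        simp [bfsPush, hv]
      rw [hred]
      obtain ⟨new, hq, hmem, hnew, hall⟩ := ih seen q
      refine ⟨new, hq, hmem, ?_, ?_⟩
      · intro x hx; exact ⟨List.mem_cons_of_mem _ (hnew x hx).1, (hnew x hx).2⟩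
      · intro x hx
        rcases List.mem_cons.mp hx with h | h
        · subst h; exact (hmem x).mpr (Or.inl hv)
        · exact hall x h
    · have hred : bfsPush d (seen, q) v = (seen.add v, q ++ [(v, d + 1)]) := by
        simp [bfsPush, hv]
      rw [hred]
      obtain ⟨new, hq, hmem, hnew, hall⟩ := ih (seen.add v) (q ++ [(v, d + 1)])
      refine ⟨v :: new, ?_, ?_, ?_, ?_⟩
      · rw [hq]; simp
      · intro x
        rw [hmem x]
        simp [PySem.Set.mem_add]
        tauto
      · intro x hx
        rcases List.mem_cons.mp hx with h | h
        · subst h; exact ⟨List.mem_cons_self .., hv⟩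
        · refine ⟨List.mem_cons_of_mem _ (hnew x h).1, fun hxs => (hnew x h).2 ?_⟩
          simp [PySem.Set.mem_add]; exact Or.inl hxs
      · intro x hx
        rcases List.mem_cons.mp hx with h | h
        · subst h
          exact (hmem x).mpr (Or.inl (by simp [PySem.Set.mem_add]))
        · exact hall x h

-- the loop invariant of A's BFS at a state (seen, q): q splits into the unprocessed rest of
-- level d and the already-discovered part of level d+1
def InvA (pairs : List (String × String)) (c : String) (hops : Int)
    (d : Nat) (F R : List String) (seen : PySem.Set String) (q : List (String × Int)) : Prop :=
  q = F.map (fun v => (v, (d : Int))) ++ R.map (fun v => (v, (d : Int) + 1)) ∧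
  (∀ x, x ∈ seen ↔ ballP pairs c d x ∨ x ∈ R) ∧
  (∀ v ∈ F, ballP pairs c d v) ∧
  (∀ x ∈ R, ballP pairs c (d + 1) x) ∧
  (d < hops.toNat → ∀ x, ballP pairs c (d + 1) x → x ∈ seen ∨ ∃ v ∈ F, adjP pairs v x) ∧
  (R ≠ [] → (d : Int) < hops) ∧
  d ≤ hops.toNat

theorem invA_level_step (pairs : List (String × String)) (c : String) (hops : Int)
    (d : Nat) (R : List String) (seen : PySem.Set String) (q : List (String × Int))
    (h : InvA pairs c hops d [] R seen q) (hR : R ≠ []) :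
    InvA pairs c hops (d + 1) R [] seen q := by
  obtain ⟨h1, h2, _, h4, h5, h6, h0⟩ := h
  have hdh : (d : Int) < hops := h6 hR
  have hdH : d + 1 ≤ hops.toNat := by omega
  have hdlt : d < hops.toNat := by omega
  have hseen : ∀ x, x ∈ seen ↔ ballP pairs c (d + 1) x := by
    intro x
    constructor
    · intro hx
      rcases (h2 x).mp hx with hb | hr
      · exact ballP_le pairs c (Nat.le_succ d) x hb
      · exact h4 x hr
    · intro hx
      rcases h5 hdlt x hx with hx' | ⟨v, hv, _⟩
      · exact hx'
      · cases hv
  refine ⟨by simpa using h1, ?_, h4, by simp, ?_, by simp, hdH⟩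
  · intro x; rw [hseen x]; simp
  · intro hlt x hx
    rcases hx with hx | ⟨v, hv, hadj⟩
    · exact Or.inl ((hseen x).mpr hx)
    · rcases (h2 v).mp ((hseen v).mpr hv) with hb | hr
      · exact Or.inl ((hseen x).mpr (Or.inr ⟨v, hb, hadj⟩))
      · exact Or.inr ⟨v, hr, hadj⟩

theorem invA_head (pairs : List (String × String)) (c : String) (hops : Int)
    (d : Nat) (F R : List String) (seen : PySem.Set String)
    (node : String) (td : Int) (rest : List (String × Int))
    (h : InvA pairs c hops d F R seen ((node, td) :: rest)) :
    ∃ d2 F2 R2, InvA pairs c hops d2 (node :: F2) R2 seen ((node, td) :: rest) ∧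
      td = (d2 : Int) ∧
      rest = F2.map (fun v => (v, (d2 : Int))) ++ R2.map (fun v => (v, (d2 : Int) + 1)) := by
  cases F with
  | cons f F2 =>
    have h1 := h.1
    simp only [List.map_cons, List.cons_append] at h1
    injection h1 with hhd htl
    have hn : node = f := congrArg Prod.fst hhd
    have htd : td = (d : Int) := congrArg Prod.snd hhd
    subst hn
    exact ⟨d, F2, R, h, htd, htl⟩
  | nil =>
    have h1 := h.1
    simp only [List.map_nil, List.nil_append] at h1
    cases R with
    | nil => simp at h1
    | cons r R2 =>
      have h' := invA_level_step pairs c hops d (r :: R2) seen _ h (by simp)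
      have h1' := h'.1
      simp only [List.map_cons] at h1'
      injection h1' with hhd htl
      have hn : node = r := congrArg Prod.fst hhd
      have htd : td = ((d + 1 : Nat) : Int) := congrArg Prod.snd hhd
      subst hn
      exact ⟨d + 1, R2, [], h', htd, by simpa using htl⟩

-- A's BFS computes exactly the hop-ball
theorem bfsA_ball (nbrs : PySem.Dict String (PySem.Set String))
    (pairs : List (String × String)) (c : String) (hops : Int)
    (hnb : ∀ v w, w ∈ nbrs.getD v PySem.Set.empty ↔ adjP pairs v w) :
    ∀ (seen : PySem.Set String) (q : List (String × Int)),
    (∃ d F R, InvA pairs c hops d F R seen q) →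
    ∀ x, (x ∈ bfsA nbrs hops seen q ↔ ballP pairs c hops.toNat x) := by
  intro seen q
  induction seen, q using bfsA.induct nbrs hops with
  | case1 seen =>
    rintro ⟨d, F, R, h1, h2, _, _, h5, _, h0⟩ x
    have hF : F = [] := by
      cases F with
      | nil => rfl
      | cons a F' => simp at h1
    have hR : R = [] := by
      cases R with
      | nil => rfl
      | cons a R' => rw [hF] at h1; simp at h1
    subst hF; subst hR
    simp only [bfsA]
    rcases Nat.lt_or_ge d hops.toNat with hd | hd
    · have hfix : ∀ y, ballP pairs c (d + 1) y → ballP pairs c d y := by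
        intro y hy
        rcases h5 hd y hy with hy' | ⟨v, hv, _⟩
        · rcases (h2 y).mp hy' with hb | hr
          · exact hb
          · cases hr
        · cases hv
      rw [ballP_fix pairs c d hfix hops.toNat (by omega) x, h2 x]
      simp
    · have hdH : d = hops.toNat := by omega
      subst hdH
      rw [h2 x]
      simp
  | case2 seen node td rest hge ih =>
    rintro ⟨d, F, R, h⟩ x
    obtain ⟨d2, F2, R2, hh, htd, hrest⟩ := invA_head pairs c hops d F R seen node td rest h
    obtain ⟨h1, h2, h3, h4, h5, h6, h0⟩ := hh
    have hd2 : d2 = hops.toNat := by omega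
    have hinv' : InvA pairs c hops d2 F2 R2 seen rest := by
      refine ⟨hrest, h2, ?_, h4, ?_, h6, h0⟩
      · intro v hv; exact h3 v (List.mem_cons_of_mem _ hv)
      · intro hlt; omega
    have := ih ⟨d2, F2, R2, hinv'⟩ x
    simpa only [bfsA, if_pos hge] using this
  | case3 seen node td rest hlt st ih =>
    rintro ⟨d, F, R, h⟩ x
    obtain ⟨d2, F2, R2, hh, htd, hrest⟩ := invA_head pairs c hops d F R seen node td rest h
    obtain ⟨h1, h2, h3, h4, h5, h6, h0⟩ := hh
    have hd2H : d2 < hops.toNat := by omega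
    obtain ⟨new, hq, hmem, hnewc, hall⟩ :=
      foldPush_spec td (nbrs.getD node PySem.Set.empty) seen rest
    have hnode : ballP pairs c d2 node := h3 node (List.mem_cons_self ..)
    have hinv' : InvA pairs c hops d2 F2 (R2 ++ new)
        (List.foldl (bfsPush td) (seen, rest) (nbrs.getD node PySem.Set.empty)).1
        (List.foldl (bfsPush td) (seen, rest) (nbrs.getD node PySem.Set.empty)).2 := by
      refine ⟨?_, ?_, ?_, ?_, ?_, ?_, h0⟩
      · rw [hq, hrest, htd]
        simp [List.map_append, List.append_assoc]
      · intro y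
        rw [hmem y, h2 y, List.mem_append]
        tauto
      · intro v hv; exact h3 v (List.mem_cons_of_mem _ hv)
      · intro y hy
        rcases List.mem_append.mp hy with hy' | hy'
        · exact h4 y hy'
        · have := (hnewc y hy').1
          exact Or.inr ⟨node, hnode, (hnb node y).mp this⟩
      · intro hltH y hy
        rcases h5 hltH y hy with hy' | ⟨v, hv, hadj⟩
        · exact Or.inl ((hmem y).mpr (Or.inl hy'))
        · rcases List.mem_cons.mp hv with hv' | hv'
          · subst hv'
            exact Or.inl (hall y ((hnb v y).mpr hadj))
          · exact Or.inr ⟨v, hv', hadj⟩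
      · intro _
        rw [htd] at hlt
        omega
    have := ih ⟨d2, F2, R2 ++ new, hinv'⟩ x
    simpa only [bfsA, if_neg hlt] using this

-- one sweep of B adds exactly the neighbors of the current set
theorem grow_mem (pairs : List (String × String)) (seen : PySem.Set String) (x : String) :
    x ∈ grow pairs seen ↔ ∃ v, v ∈ seen ∧ adjP pairs v x := by
  simp only [grow, PySem.Set.mem_union, PySem.Set.mem_ofList, List.mem_map, List.mem_filter,
    adjP, PySem.Set.contains_iff]
  constructor
  · rintro (⟨p, ⟨hp, hmem⟩, hpx⟩ | ⟨p, ⟨hp, hmem⟩, hpx⟩)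
    · exact ⟨p.1, hmem, p, hp, Or.inl ⟨rfl, hpx⟩⟩
    · exact ⟨p.2, hmem, p, hp, Or.inr ⟨hpx, rfl⟩⟩
  · rintro ⟨v, hv, p, hp, ⟨h1, h2⟩ | ⟨h1, h2⟩⟩
    · exact Or.inl ⟨p, ⟨hp, h1 ▸ hv⟩, h2⟩
    · exact Or.inr ⟨p, ⟨hp, h2 ▸ hv⟩, h1⟩

-- B's sweep loop computes exactly the hop-ball
theorem bfsB_ball (pairs : List (String × String)) (c : String) :
    ∀ (f : Nat) (T : PySem.Set String) (k : Nat),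
    (∀ x, x ∈ T ↔ ballP pairs c k x) →
    ∀ x, (x ∈ bfsB pairs f T ↔ ballP pairs c (k + f) x) := by
  intro f
  induction f with
  | zero => intro T k h x; simpa using h x
  | succ f ih =>
    intro T k h x
    simp only [bfsB]
    have hstep : ∀ y, (y ∈ PySem.Set.union T (grow pairs T) ↔ ballP pairs c (k + 1) y) := by
      intro y
      rw [PySem.Set.mem_union]
      constructor
      · rintro (hy | hy)
        · exact ballP_le pairs c (Nat.le_succ k) y ((h y).mp hy)
        · obtain ⟨v, hv, hadj⟩ := (grow_mem pairs T y).mp hy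
          exact Or.inr ⟨v, (h v).mp hv, hadj⟩
      · rintro (hy | ⟨v, hv, hadj⟩)
        · exact Or.inl ((h y).mpr hy)
        · exact Or.inr ((grow_mem pairs T y).mpr ⟨v, (h v).mpr hv, hadj⟩)
    by_cases hsub : (PySem.Set.issubset (grow pairs T) T) = true
    · simp only [hsub, if_true]
      have hsub' := (PySem.Set.issubset_iff ..).mp hsub
      have hfix : ∀ y, ballP pairs c (k + 1) y → ballP pairs c k y := by
        intro y hy
        have : y ∈ PySem.Set.union T (grow pairs T) := (hstep y).mpr hy
        rw [PySem.Set.mem_union] at this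
        rcases this with hy' | hy'
        · exact (h y).mp hy'
        · exact (h y).mp (hsub' y hy')
      have harith : k + (f + 1) = k + f + 1 := by omega
      rw [harith, ballP_fix pairs c k hfix (k + f + 1) (by omega) x]
      exact h x
    · simp only [hsub, Bool.false_eq_true, if_false]
      have hrec := ih (PySem.Set.union T (grow pairs T)) (k + 1) hstep x
      rw [hrec]
      have harith : k + 1 + f = k + (f + 1) := by omega
      rw [harith]

-- membership in the two computed seen sets agrees
theorem seen_agree (edges : List (List (String × String))) (c : String) (hops : Int) :
    ∀ x, (x ∈ bfsA (buildNbrs edges) hops (PySem.Set.add PySem.Set.empty c) [(c, 0)] ↔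
          x ∈ bfsB (pairsOf edges) hops.toNat (PySem.Set.add PySem.Set.empty c)) := by
  intro x
  have hnb : ∀ v w, w ∈ (buildNbrs edges).getD v PySem.Set.empty ↔ adjP (pairsOf edges) v w := by
    intro v w
    apply nbr_pair_spec
    intro v w
    simp [PySem.Dict.getD_empty, PySem.Set.empty, adjP]
  have hinit : ∀ y, y ∈ PySem.Set.add PySem.Set.empty c ↔ ballP (pairsOf edges) c 0 y := by
    intro y; simp [PySem.Set.empty, ballP]
  have hinv : InvA (pairsOf edges) c hops 0 [c] []
      (PySem.Set.add PySem.Set.empty c) [(c, 0)] := by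
    refine ⟨by simp, ?_, ?_, by simp, ?_, by simp, by omega⟩
    · intro y; rw [hinit y]; simp
    · intro v hv
      simp only [List.mem_singleton] at hv
      subst hv
      exact rfl
    · intro _ y hy
      rcases hy with hy | ⟨v, hv, hadj⟩
      · exact Or.inl ((hinit y).mpr hy)
      · have hvc : v = c := hv
        subst hvc
        exact Or.inr ⟨v, List.mem_singleton_self v, hadj⟩
  have hA := bfsA_ball (buildNbrs edges) (pairsOf edges) c hops hnb
    (PySem.Set.add PySem.Set.empty c) [(c, 0)] ⟨0, [c], [], hinv⟩ x
  have hB := bfsB_ball (pairsOf edges) c hops.toNat (PySem.Set.add PySem.Set.empty c) 0 hinit x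
  rw [hA, hB]
  simp

theorem pvContainsEqDecide (seen : PySem.Set String) (x : String) :
    (seen.contains x) = decide (x ∈ seen) := by
  simp [PySem.Set.contains_eq_listContains, List.contains_eq_mem]

theorem contains_agree (s t : PySem.Set String) (h : ∀ x, x ∈ s ↔ x ∈ t) (y : String) :
    s.contains y = t.contains y := by
  rw [pvContainsEqDecide, pvContainsEqDecide]
  by_cases hy : y ∈ s
  · simp [hy, (h y).mp hy]
  · have h2 : y ∉ t := fun hc => hy ((h y).mpr hc)
    simp [hy, h2]

-- ===== VERDICT (by name: the statement is the Claim_ definition above) =====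
theorem build_subgraph_spec : Claim_equal_build_subgraph := by
  intro adj center_id hops _
  unfold Spec_build_subgraph build_subgraph build_subgraph_alt
  by_cases hc : (center_id == "") = true
  · simp only [hc, if_true]
  · simp only [hc]
    have hsub := seen_agree ((PySem.Dict.mk adj).getD "edges" []) center_id hops
    have hcont := contains_agree _ _ hsub
    have hnodes :
        ((PySem.Dict.mk adj).getD "nodes" []).filter
          (fun n => (bfsA (buildNbrs ((PySem.Dict.mk adj).getD "edges" [])) hops
            (PySem.Set.add PySem.Set.empty center_id) [(center_id, 0)]).contains
              (pystr ((PySem.Dict.mk n).get? "id")))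
        = ((PySem.Dict.mk adj).getD "nodes" []).filter
          (fun n => (bfsB (pairsOf ((PySem.Dict.mk adj).getD "edges" [])) hops.toNat
            (PySem.Set.add PySem.Set.empty center_id)).contains
              (pystr ((PySem.Dict.mk n).get? "id"))) := by
      apply List.filter_congr
      intro n _
      exact hcont _
    simp only [hnodes]
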